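-- pv_equiv track=rewrite | github.com/bharaths33/study-planner-ai | docs/generate_report_pdf.py | paginate
-- ===== SOURCE A (Python) =====
-- PAGE_HEIGHT = 842
--
-- LEFT = 54
--
-- TOP = 60
--
-- BOTTOM = 54
--
-- LINE_HEIGHT = 18
--
-- def paginate(lines):
--     pages = []
--     current = []
--     y = PAGE_HEIGHT - TOP
--
--     for line in lines:
--         if y < BOTTOM:
--             pages.append(current)
--             current = []
--             y = PAGE_HEIGHT - TOP
--         current.append((LEFT, y, line))
--         y -= LINE_HEIGHT
--
--     if current:
--         pages.append(current)
--     return pages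
-- ===== SOURCE B (Python) =====
-- PAGE_HEIGHT = 842
--
-- LEFT = 54
--
-- TOP = 60
--
-- BOTTOM = 54
--
-- LINE_HEIGHT = 18
--
-- def paginate(lines):
--     per_page = (PAGE_HEIGHT - TOP - BOTTOM) // LINE_HEIGHT + 1
--     return [
--         [(LEFT, PAGE_HEIGHT - TOP - LINE_HEIGHT * i, line)
--          for i, line in enumerate(lines[start:start + per_page])]
--         for start in range(0, len(lines), per_page)
--     ]
-- ===== Notes on version B (the rewrite author's own statement) =====
-- stated objective: simpler
-- what changed: Replaced the running y-cursor with its page-break-and-reset branch by computing the page capacity from the constants and recursively slicing the lines into fixed-size chunks with closed-form coordinates per row.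
import Mathlib
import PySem

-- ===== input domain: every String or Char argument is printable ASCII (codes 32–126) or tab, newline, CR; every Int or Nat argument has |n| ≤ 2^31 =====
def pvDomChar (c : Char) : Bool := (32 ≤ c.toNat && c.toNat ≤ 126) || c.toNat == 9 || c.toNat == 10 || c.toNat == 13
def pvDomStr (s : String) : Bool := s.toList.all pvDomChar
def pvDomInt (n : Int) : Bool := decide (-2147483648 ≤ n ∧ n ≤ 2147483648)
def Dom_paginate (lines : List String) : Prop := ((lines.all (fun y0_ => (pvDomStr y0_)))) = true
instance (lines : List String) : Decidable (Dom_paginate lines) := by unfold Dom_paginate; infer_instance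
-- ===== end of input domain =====

-- B replaces A's running y-cursor with its page-break-and-reset branch by slicing the lines
-- into fixed-size chunks (capacity computed from the constants) with closed-form coordinates (objective: simpler).

-- ===== PORT A =====
-- loop body of A's for-loop: state = (pages, current, y)
def pvStepA (st : List (List (Int × Int × String)) × List (Int × Int × String) × Int)
    (line : String) : List (List (Int × Int × String)) × List (Int × Int × String) × Int :=
  let st := if st.2.2 < 54 then (st.1 ++ [st.2.1], ([] : List (Int × Int × String)), (842 - 60 : Int)) else st
  (st.1, st.2.1 ++ [(54, st.2.2, line)], st.2.2 - 18)

def paginate (lines : List String) : List (List (Int × Int × String)) :=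
  let s := lines.foldl pvStepA ([], [], 842 - 60)
  if s.2.1 ≠ [] then s.1 ++ [s.2.1] else s.1

-- ===== PORT B =====
-- per_page = (PAGE_HEIGHT - TOP - BOTTOM) // LINE_HEIGHT + 1
def pvPerPage : Int := PySem.Int.floordiv (842 - 60 - 54) 18 + 1

-- Source B: outer comprehension over range(0, len(lines), per_page) = pyRange, slice per chunk,
-- inner enumerate comprehension = enumerate + map
def paginate_alt (lines : List String) : List (List (Int × Int × String)) :=
  (PySem.List.pyRange 0 (lines.length : Int) pvPerPage).map (fun start =>
    (PySem.List.enumerate (PySem.List.slice lines (some start) (some (start + pvPerPage)))).map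
      (fun p => ((54 : Int), 842 - 60 - 18 * p.1, p.2)))

-- ===== PRECONDITION & SPEC =====
def Spec_paginate (lines : List String) (out : List (List (Int × Int × String))) : Prop := out = paginate_alt lines
instance (lines : List String) (out : List (List (Int × Int × String))) : Decidable (Spec_paginate lines out) := by unfold Spec_paginate; infer_instance

-- ===== CLAIM (what is proved, stated in full; the proofs are below) =====
def Claim_equal_paginate : Prop := ∀ (lines : List String), Dom_paginate lines → Spec_paginate lines (paginate lines)

-- ===== LEMMAS AND PROOFS =====

theorem pvPerPage_eq : pvPerPage = 41 := by decide

-- rows of one page starting at slot k (proof helper; matches B's enumerate comprehension)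
def pvRows (k : Nat) : List String → List (Int × Int × String)
  | [] => []
  | l :: ls => ((54 : Int), 842 - 60 - 18 * (k : Int), l) :: pvRows (k + 1) ls

-- recursive chunking (proof helper bridging the two ports)
def pvPagesRec (lines : List String) : List (List (Int × Int × String)) :=
  if lines = [] then []
  else pvRows 0 (lines.take 41) :: pvPagesRec (lines.drop 41)
termination_by lines.length
decreasing_by
  simp only [List.length_drop]
  have : lines.length ≠ 0 := by simpa [List.length_eq_zero_iff] using (by assumption : ¬ lines = [])
  omega

theorem pvRows_enumerate (ls : List String) (k : Nat) :
    (PySem.List.enumerate ls (k : Int)).map (fun p => ((54 : Int), 842 - 60 - 18 * p.1, p.2))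
      = pvRows k ls := by
  induction ls generalizing k with
  | nil => simp [PySem.List.enumerate_nil, pvRows]
  | cons l ls ih =>
    rw [PySem.List.enumerate_cons]
    have h1 : ((k : Int) + 1) = ((k + 1 : Nat) : Int) := by push_cast; ring
    simp only [List.map_cons, pvRows, h1, ih]

theorem pvRows_ne_nil (k : Nat) (l : String) (ls : List String) :
    pvRows k (l :: ls) ≠ [] := by simp [pvRows]

theorem pvPagesRec_nil : pvPagesRec [] = [] := by
  rw [pvPagesRec]; simp

theorem pvPagesRec_cons (lines : List String) (h : lines ≠ []) :
    pvPagesRec lines = pvRows 0 (lines.take 41) :: pvPagesRec (lines.drop 41) := by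
  rw [pvPagesRec, if_neg h]

-- splitting off the first chunk start of range(0, b, 41)
theorem pvChunkRange (b : Int) (hb : 0 < b) :
    PySem.List.pyRange 0 b 41 =
      0 :: (PySem.List.pyRange 0 (b - 41) 41).map (fun x => x + 41) := by
  rw [PySem.List.pyRange_of_pos 0 b (by norm_num),
    PySem.List.pyRange_of_pos 0 (b - 41) (by norm_num)]
  by_cases h41 : b ≤ 41
  · rw [if_pos hb, if_neg (by omega)]
    have hc : ((b - 0 + 41 - 1) / 41).toNat = 1 := by omega
    rw [hc]
    simp
  · rw [if_pos hb, if_pos (by omega)]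
    have hc : ((b - 0 + 41 - 1) / 41).toNat = ((b - 41 - 0 + 41 - 1) / 41).toNat + 1 := by omega
    rw [hc, List.range_succ_eq_map]
    simp only [List.map_cons, List.map_map, List.cons.injEq]
    refine ⟨by norm_num, ?_⟩
    apply List.map_congr_left
    intro k _
    simp only [Function.comp_apply]
    push_cast; ring

-- the Int length bound used for the recursive call
theorem pvRangeSub (m : Nat) :
    PySem.List.pyRange 0 ((m : Int) - 41) 41 = PySem.List.pyRange 0 ((m - 41 : Nat) : Int) 41 := by
  by_cases h : 41 ≤ m
  · have : ((m : Int) - 41) = ((m - 41 : Nat) : Int) := by omega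
    rw [this]
  · have h1 : (m : Int) - 41 ≤ 0 := by omega
    have h2 : ((m - 41 : Nat) : Int) ≤ 0 := by omega
    rw [PySem.List.pyRange_of_pos 0 _ (by norm_num : (0:Int) < 41),
      PySem.List.pyRange_of_pos 0 _ (by norm_num : (0:Int) < 41),
      if_neg (by omega), if_neg (by omega)]

-- B's map-over-starts form equals the recursive chunking
theorem pvAlt_eq_rec_aux : ∀ (n : Nat) (lines : List String), lines.length ≤ n →
    paginate_alt lines = pvPagesRec lines := by
  intro n
  induction n with
  | zero =>
    intro lines hlen
    have : lines = [] := by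
      cases lines with
      | nil => rfl
      | cons a as => simp at hlen
    subst this
    rw [pvPagesRec_nil]
    simp [paginate_alt, pvPerPage_eq, PySem.List.pyRange_of_pos 0 0 (by norm_num : (0:Int) < 41)]
  | succ n ih =>
    intro lines hlen
    by_cases hnil : lines = []
    · subst hnil
      rw [pvPagesRec_nil]
      simp [paginate_alt, pvPerPage_eq, PySem.List.pyRange_of_pos 0 0 (by norm_num : (0:Int) < 41)]
    · have hpos : 0 < lines.length := List.length_pos_iff.mpr hnil
      unfold paginate_alt
      rw [pvPerPage_eq, pvChunkRange (lines.length : Int) (by exact_mod_cast hpos)]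
      rw [pvPagesRec_cons lines hnil, List.map_cons, List.map_map]
      congr 1
      · -- head page: slice lines 0 41 = take 41
        have h0 : PySem.List.slice lines (some 0) (some (0 + 41)) = lines.take 41 := by
          rw [PySem.List.slice_toNat lines (by norm_num) (by norm_num)]
          norm_num [show ((41:Int)).toNat = 41 from rfl]
        rw [h0, ← pvRows_enumerate (lines.take 41) 0]
        norm_num
      · -- tail pages: shift starts by 41 = recursion on drop 41
        rw [← ih (lines.drop 41) (by simp only [List.length_drop]; omega)]
        unfold paginate_alt
        rw [pvPerPage_eq, List.length_drop, ← pvRangeSub lines.length]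
        apply List.map_congr_left
        intro x hx
        have hx0 : 0 ≤ x := ((PySem.List.mem_pyRange_iff_of_pos (by norm_num) x).mp hx).1
        simp only [Function.comp_apply]
        have hsl : PySem.List.slice lines (some (x + 41)) (some (x + 41 + 41)) =
            PySem.List.slice (lines.drop 41) (some x) (some (x + 41)) := by
          rw [PySem.List.slice_toNat lines (by omega) (by omega),
            PySem.List.slice_toNat (lines.drop 41) (by omega) (by omega),
            List.drop_drop]
          have e1 : (x + 41).toNat = x.toNat + 41 := by omega
          have e2 : (x + 41 + 41).toNat = x.toNat + 82 := by omega
          rw [e1, e2]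
          have e3 : x.toNat + 82 - (x.toNat + 41) = 41 := by omega
          have e4 : x.toNat + 41 - x.toNat = 41 := by omega
          rw [e3, e4, Nat.add_comm 41 x.toNat]
        rw [hsl]

theorem pvAlt_eq_rec (lines : List String) : paginate_alt lines = pvPagesRec lines :=
  pvAlt_eq_rec_aux lines.length lines (le_refl _)

-- core invariant of A's fold: starting with a partially filled page of k ≤ 41 rows
theorem stepA_inv : ∀ (lines : List String) (pages : List (List (Int × Int × String)))
    (cur : List (Int × Int × String)) (k : Nat), k = cur.length → k ≤ 41 →
    lines.foldl pvStepA (pages, cur, 842 - 60 - 18 * (k : Int)) =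
      if lines.length + k ≤ 41
      then (pages, cur ++ pvRows k lines, 842 - 60 - 18 * ((k : Int) + lines.length))
      else (lines.drop (41 - k)).foldl pvStepA
        (pages ++ [cur ++ pvRows k (lines.take (41 - k))], [], 842 - 60) := by
  intro lines
  induction lines with
  | nil =>
    intro pages cur k hk hle
    simp only [List.foldl_nil, List.length_nil, Nat.zero_add]
    rw [if_pos hle]
    simp [pvRows]
  | cons l ls ih =>
    intro pages cur k hk hle
    by_cases h40 : k ≤ 40
    · -- no page break on this iteration
      have hy : ¬ ((842 - 60 - 18 * (k : Int)) < 54) := by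
        have : (k : Int) ≤ 40 := by exact_mod_cast h40
        omega
      have hstep : pvStepA (pages, cur, 842 - 60 - 18 * (k : Int)) l =
          (pages, cur ++ [((54 : Int), 842 - 60 - 18 * (k : Int), l)],
            842 - 60 - 18 * ((k + 1 : Nat) : Int)) := by
        simp only [pvStepA, if_neg hy]
        push_cast; ring_nf
      rw [List.foldl_cons, hstep,
        ih pages (cur ++ [((54 : Int), 842 - 60 - 18 * (k : Int), l)]) (k + 1)
          (by simp [List.length_append, ← hk]) (by omega)]
      by_cases hfit : ls.length + (k + 1) ≤ 41
      · rw [if_pos hfit, if_pos (by simp only [List.length_cons]; omega)]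
        simp only [pvRows, List.append_assoc, List.singleton_append, Prod.mk.injEq, List.length_cons]
        refine ⟨trivial, trivial, by push_cast; ring⟩
      · rw [if_neg hfit, if_neg (by simp only [List.length_cons]; omega)]
        have hd : (l :: ls).drop (41 - k) = ls.drop (41 - (k + 1)) := by
          have : 41 - k = (41 - (k + 1)) + 1 := by omega
          rw [this, List.drop_succ_cons]
        have ht : (l :: ls).take (41 - k) = l :: ls.take (41 - (k + 1)) := by
          have : 41 - k = (41 - (k + 1)) + 1 := by omega
          rw [this, List.take_succ_cons]
        rw [hd, ht]
        simp [pvRows, List.append_assoc]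
    · -- k = 41: the page is full, A breaks before appending
      have hk41 : k = 41 := by omega
      subst hk41
      have hy : ((842 - 60 - 18 * ((41 : Nat) : Int)) < 54) := by norm_num
      have hstep : pvStepA (pages, cur, 842 - 60 - 18 * ((41 : Nat) : Int)) l =
          (pages ++ [cur], [((54 : Int), 842 - 60, l)], 842 - 60 - 18) := by
        simp only [pvStepA, if_pos hy]
        norm_num
      rw [List.foldl_cons, hstep]
      rw [if_neg (by simp only [List.length_cons]; omega)]
      -- RHS: drop (41-41) = everything; the bracketed page is just cur
      have hrhs : (l :: ls).drop (41 - 41) = l :: ls := by simp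
      have htk : pvRows 41 ((l :: ls).take (41 - 41)) = [] := by simp [pvRows]
      rw [hrhs, htk, List.append_nil]
      -- unfold one step of the RHS fold: fresh page, y = 782 ≥ 54
      have hstep2 : pvStepA (pages ++ [cur], [], 842 - 60) l =
          (pages ++ [cur], [((54 : Int), 842 - 60, l)], 842 - 60 - 18) := by
        simp [pvStepA]
      rw [List.foldl_cons, hstep2]

-- assembling: A's finished fold from a fresh page equals pages ++ the chunked result
theorem pv_main : ∀ (n : Nat) (lines : List String) (pages : List (List (Int × Int × String))),
    lines.length ≤ n →
    (let s := lines.foldl pvStepA (pages, [], 842 - 60)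
     if s.2.1 ≠ [] then s.1 ++ [s.2.1] else s.1) = pages ++ pvPagesRec lines := by
  intro n
  induction n with
  | zero =>
    intro lines pages hlen
    have : lines = [] := by
      cases lines with
      | nil => rfl
      | cons a as => simp at hlen
    subst this
    simp [pvPagesRec_nil]
  | succ n ih =>
    intro lines pages hlen
    have h0 : (842 - 60 - 18 * ((0 : Nat) : Int)) = 842 - 60 := by norm_num
    have hS := stepA_inv lines pages [] 0 rfl (by omega)
    rw [h0] at hS
    by_cases hfit : lines.length + 0 ≤ 41
    · rw [hS, if_pos hfit]
      cases lines with
      | nil => simp [pvPagesRec_nil, pvRows]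
      | cons l ls =>
        simp only [List.nil_append]
        rw [if_pos (by exact pvRows_ne_nil 0 l ls)]
        rw [pvPagesRec_cons (l :: ls) (by simp)]
        have htk : (l :: ls).take 41 = l :: ls :=
          List.take_of_length_le (by omega)
        have hdp : (l :: ls).drop 41 = [] :=
          List.drop_of_length_le (by omega)
        rw [htk, hdp, pvPagesRec_nil]
    · rw [hS, if_neg hfit]
      have hlen' : (lines.drop (41 - 0)).length ≤ n := by
        simp only [List.length_drop]; omega
      have := ih (lines.drop (41 - 0)) (pages ++ [[] ++ pvRows 0 (lines.take (41 - 0))]) hlen'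
      simp only at this ⊢
      rw [this]
      rw [pvPagesRec_cons lines (by intro h; subst h; simp at hfit)]
      simp [List.append_assoc]

-- ===== VERDICT (by name: the statement is the Claim_ definition above) =====
theorem paginate_spec : Claim_equal_paginate := by
  intro lines _
  unfold Spec_paginate paginate
  rw [pvAlt_eq_rec]
  simpa using pv_main lines.length lines [] (le_refl _)
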